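-- pv_equiv track=rewrite | github.com/citizen-erased/advent_of_code | 2024/02.b/program.py | is_safe_allow_single_error
-- ===== SOURCE A (Python) =====
-- def is_safe(report):
--     if not (report == sorted(report) or report == list(reversed(sorted(report)))):
--         return False
--
--     for i in range(0, len(report) - 1):
--         a, b = report[i], report[i + 1]
--         diff = abs(a - b)
--
--         if diff < 1 or diff > 3:
--             return False
--
--     return True
--
-- def is_safe_allow_single_error(report):
--     if is_safe(report):
--         return True
--
--     for i in range(len(report)):
--         report2 = [x for x in report]
--         del report2[i]
--
--         if is_safe(report2):
--             return True
--
--     return False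
-- ===== SOURCE B (Python) =====
-- def is_safe_allow_single_error(report):
--     def ok(seq, s):
--         return all(1 <= s * (b - a) <= 3 for a, b in zip(seq, seq[1:]))
--
--     def first_bad(seq, s):
--         for i in range(len(seq) - 1):
--             if not (1 <= s * (seq[i + 1] - seq[i]) <= 3):
--                 return i
--         return None
--
--     def dir_ok(s):
--         i = first_bad(report, s)
--         if i is None:
--             return True
--         return ok(report[:i] + report[i + 1:], s) or ok(report[:i + 1] + report[i + 2:], s)
--
--     return dir_ok(1) or dir_ok(-1)
-- ===== Notes on version B (the rewrite author's own statement) =====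
-- stated objective: faster
-- what changed: Instead of re-sorting and re-checking the list for every possible single deletion, B locates the first violating adjacent pair per monotonic direction with one linear scan and tests only the two deletions that can repair it.
import Mathlib
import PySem

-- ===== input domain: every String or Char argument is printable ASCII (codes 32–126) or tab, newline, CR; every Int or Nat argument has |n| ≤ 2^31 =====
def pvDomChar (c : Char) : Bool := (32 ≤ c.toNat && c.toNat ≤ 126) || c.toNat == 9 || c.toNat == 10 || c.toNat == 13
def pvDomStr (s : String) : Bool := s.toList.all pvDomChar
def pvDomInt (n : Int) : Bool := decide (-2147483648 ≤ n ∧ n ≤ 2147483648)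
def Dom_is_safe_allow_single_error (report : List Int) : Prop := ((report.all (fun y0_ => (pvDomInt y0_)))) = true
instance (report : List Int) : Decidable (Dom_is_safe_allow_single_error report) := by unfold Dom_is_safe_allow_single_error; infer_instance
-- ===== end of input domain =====

-- B replaces A's try-every-deletion-with-a-sort-based-check by one linear scan per direction,
-- testing only the two deletions that can repair the first violating adjacent pair (faster).


-- ===== PORT A =====
-- the loop 'for i in range(0, len(report)-1): a, b = report[i], report[i+1]; …'
-- as the obvious structural recursion over the same adjacent pairs, same early return
def pairsA : List Int → Bool
  | a :: b :: t => if |a - b| < 1 ∨ |a - b| > 3 then false else pairsA (b :: t)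
  | _ => true

def isSafeA (report : List Int) : Bool :=
  if !(report == PySem.List.sorted report (fun x => x) false
       || report == (PySem.List.sorted report (fun x => x) false).reverse) then false
  else pairsA report
-- report2 = [x for x in report]; del report2[i]   (i is always in range here)
def popDel (report : List Int) (i : Int) : List Int :=
  match PySem.List.pop? report i with
  | some (_, r) => r
  | none => report
def loopA (report : List Int) : List Int → Bool
  | [] => false
  | i :: rest =>
      if isSafeA (popDel report i) then true else loopA report rest
def is_safe_allow_single_error (report : List Int) : Bool :=
  if isSafeA report then true
  else loopA report (PySem.List.pyRange 0 (report.length : Int) 1)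

-- ===== PORT B =====
-- ok(seq, s): all(1 <= s*(b-a) <= 3 for a, b in zip(seq, seq[1:]))
def okB (s : Int) : List Int → Bool
  | a :: b :: t => (1 ≤ s * (b - a) && s * (b - a) ≤ 3) && okB s (b :: t)
  | _ => true
-- first_bad(seq, s): index of the first adjacent pair violating the step rule, else None
def firstBadB (s : Int) : List Int → Option Nat
  | a :: b :: t =>
      if 1 ≤ s * (b - a) ∧ s * (b - a) ≤ 3 then (firstBadB s (b :: t)).map (· + 1)
      else some 0
  | _ => none
-- report[:i] + report[i+1:]  (i ≥ 0 and in range here, so the slices are exactly take/drop)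
def delB (l : List Int) (i : Nat) : List Int := l.take i ++ l.drop (i + 1)
def dirOkB (report : List Int) (s : Int) : Bool :=
  match firstBadB s report with
  | none => true
  | some i => okB s (delB report i) || okB s (delB report (i + 1))
def is_safe_allow_single_error_alt (report : List Int) : Bool :=
  dirOkB report 1 || dirOkB report (-1)

-- ===== PRECONDITION & SPEC =====
def Spec_is_safe_allow_single_error (report : List Int) (out : Bool) : Prop := out = is_safe_allow_single_error_alt report
instance (report : List Int) (out : Bool) : Decidable (Spec_is_safe_allow_single_error report out) := by unfold Spec_is_safe_allow_single_error; infer_instance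

-- ===== CLAIM (what is proved, stated in full; the proofs are below) =====
def Claim_equal_is_safe_allow_single_error : Prop := ∀ (report : List Int), Dom_is_safe_allow_single_error report → Spec_is_safe_allow_single_error report (is_safe_allow_single_error report)

-- ===== LEMMAS AND PROOFS =====

-- the step relation of direction s: 1 <= s*(b-a) <= 3
def StepR (s a b : Int) : Prop := 1 ≤ s * (b - a) ∧ s * (b - a) ≤ 3

theorem okB_iff_chain (s : Int) (l : List Int) :
    okB s l = true ↔ l.IsChain (StepR s) := by
  induction l with
  | nil => simp [okB]
  | cons a t ih =>
    cases t with
    | nil => simp [okB]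
    | cons b t' =>
      simp only [okB, Bool.and_eq_true, decide_eq_true_eq, List.isChain_cons_cons, ih, StepR]

theorem pairsA_iff_chain (l : List Int) :
    pairsA l = true ↔ l.IsChain (fun a b => 1 ≤ |a - b| ∧ |a - b| ≤ 3) := by
  induction l with
  | nil => simp [pairsA]
  | cons a t ih =>
    cases t with
    | nil => simp [pairsA]
    | cons b t' =>
      simp only [pairsA]
      simp only [Int.abs_eq_natAbs] at ih ⊢
      rw [List.isChain_cons_cons, ← ih]
      split <;> rename_i h
      · simp only [Bool.false_eq_true, false_iff]
        rintro ⟨⟨h1, h2⟩, -⟩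
        omega
      · constructor
        · intro hh; exact ⟨⟨by omega, by omega⟩, hh⟩
        · rintro ⟨-, hh⟩; exact hh

theorem chain'_and {α : Type} (P Q : α → α → Prop) (l : List α) :
    l.IsChain (fun a b => P a b ∧ Q a b) ↔ (l.IsChain P ∧ l.IsChain Q) := by
  simp only [List.isChain_iff_getElem]
  constructor
  · intro h; exact ⟨fun i hi => (h i hi).1, fun i hi => (h i hi).2⟩
  · rintro ⟨h1, h2⟩ i hi; exact ⟨h1 i hi, h2 i hi⟩

theorem eq_sorted_iff (l : List Int) :
    l = PySem.List.sorted l (fun x => x) false ↔ l.Pairwise (· ≤ ·) := by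
  constructor
  · intro h
    have := PySem.List.sorted_pairwise (xs := l) (key := fun x => x)
    rw [← h] at this
    simpa using this
  · intro h
    exact (PySem.List.sorted_eq_self_of_pairwise l _ (by simpa using h)).symm

theorem eq_rev_sorted_iff (l : List Int) :
    l = (PySem.List.sorted l (fun x => x) false).reverse ↔ l.Pairwise (fun a b => b ≤ a) := by
  constructor
  · intro h
    have := PySem.List.sorted_pairwise (xs := l) (key := fun x => x)
    have h2 : l.reverse = PySem.List.sorted l (fun x => x) false := by
      conv_lhs => rw [h]
      simp
    rw [← h2] at this
    simpa [List.pairwise_reverse] using this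
  · intro h
    have hrev : l.reverse.Pairwise (fun a b : Int => a ≤ b) := by
      simpa [List.pairwise_reverse] using h
    have h1 : PySem.List.sorted l.reverse (fun x => x) false = l.reverse :=
      PySem.List.sorted_eq_self_of_pairwise l.reverse _ (by simpa using hrev)
    have h2 : PySem.List.sorted l (fun x => x) false = PySem.List.sorted l.reverse (fun x => x) false :=
      PySem.List.sorted_eq_sorted_of_perm _ _ _ (fun a b hab => hab) (List.reverse_perm l).symm
    rw [h2, h1]; simp
theorem delB_eq_eraseIdx (l : List Int) (i : Nat) : delB l i = l.eraseIdx i := by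
  induction l generalizing i with
  | nil => simp [delB]
  | cons a t ih =>
    cases i with
    | zero => simp [delB]
    | succ j =>
      simp only [delB, List.take_succ_cons, List.drop_succ_cons, List.eraseIdx_cons_succ,
        List.cons_append, List.cons.injEq, true_and]
      exact ih j

theorem isSafeA_iff (l : List Int) :
    isSafeA l = true ↔ (l.IsChain (StepR 1) ∨ l.IsChain (StepR (-1))) := by
  have habs : ∀ m : List Int,
      m.IsChain (fun a b => 1 ≤ |a - b| ∧ |a - b| ≤ 3) ∧ (m.Pairwise (· ≤ ·) ∨ m.Pairwise (fun a b => b ≤ a))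
      ↔ (m.IsChain (StepR 1) ∨ m.IsChain (StepR (-1))) := by
    intro m
    have hle : ∀ (r : Int → Int → Prop), Transitive r → (m.Pairwise r ↔ m.IsChain r) := by
      intro r hr
      have : Trans r r r := ⟨fun h1 h2 => hr h1 h2⟩
      exact (List.isChain_iff_pairwise).symm
    rw [hle (· ≤ ·) (fun _ _ _ h1 h2 => le_trans h1 h2),
        hle (fun a b => b ≤ a) (fun _ _ _ h1 h2 => le_trans h2 h1)]
    rw [and_comm, or_and_right, ← chain'_and, ← chain'_and]
    constructor
    · rintro (h | h)
      · left; refine h.imp ?_; rintro a b ⟨hab, h1, h2⟩; constructor <;>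
          (simp only [StepR, Int.abs_eq_natAbs] at *; omega)
      · right; refine h.imp ?_; rintro a b ⟨hab, h1, h2⟩; constructor <;>
          (simp only [StepR, Int.abs_eq_natAbs] at *; omega)
    · rintro (h | h)
      · left; refine h.imp ?_; rintro a b ⟨h1, h2⟩; refine ⟨?_, ?_, ?_⟩ <;>
          (simp only [StepR, Int.abs_eq_natAbs] at *; omega)
      · right; refine h.imp ?_; rintro a b ⟨h1, h2⟩; refine ⟨?_, ?_, ?_⟩ <;>
          (simp only [StepR, Int.abs_eq_natAbs] at *; omega)
  rw [← habs, ← pairsA_iff_chain, ← eq_sorted_iff, ← eq_rev_sorted_iff]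
  unfold isSafeA
  split <;> rename_i h <;> simp at h <;> tauto

theorem loopA_iff (report : List Int) (idxs : List Int) :
    loopA report idxs = true ↔ ∃ i ∈ idxs, isSafeA (popDel report i) = true := by
  induction idxs with
  | nil => simp [loopA]
  | cons i rest ih =>
    simp only [loopA]
    split <;> rename_i h
    · simp only [true_iff]
      exact ⟨i, List.mem_cons_self, h⟩
    · rw [ih]
      constructor
      · rintro ⟨j, hj, hs⟩; exact ⟨j, List.mem_cons_of_mem _ hj, hs⟩
      · rintro ⟨j, hj, hs⟩
        rcases List.mem_cons.mp hj with rfl | hj'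
        · exact absurd hs (by simpa using h)
        · exact ⟨j, hj', hs⟩

theorem firstBadB_none_iff (s : Int) (l : List Int) :
    firstBadB s l = none ↔ okB s l = true := by
  induction l with
  | nil => simp [firstBadB, okB]
  | cons a t ih =>
    cases t with
    | nil => simp [firstBadB, okB]
    | cons b t' =>
      simp only [firstBadB, okB]
      split <;> rename_i h
      · simp [ih, h]
      · simp [h]

theorem firstBadB_some (s : Int) (l : List Int) (i : Nat)
    (h : firstBadB s l = some i) :
    i + 1 < l.length ∧ ∀ (hlt : i + 1 < l.length), ¬ StepR s l[i] l[i + 1] := by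
  induction l generalizing i with
  | nil => simp [firstBadB] at h
  | cons a t ih =>
    cases t with
    | nil => simp [firstBadB] at h
    | cons b t' =>
      simp only [firstBadB] at h
      split at h <;> rename_i hs
      · rcases Option.map_eq_some_iff.mp h with ⟨j, hj, rfl⟩
        obtain ⟨hlen, hbad⟩ := ih j hj
        refine ⟨by simpa using Nat.succ_lt_succ hlen, ?_⟩
        intro hlt
        simpa using hbad (by simpa using Nat.lt_of_succ_lt_succ hlt)
      · obtain rfl : i = 0 := by simpa using h.symm
        exact ⟨by simp, fun _ => by simpa [StepR] using hs⟩

theorem not_chain_del_of_bad (s : Int) (l : List Int) (i j : Nat)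
    (hlt : i + 1 < l.length) (hbad : ¬ StepR s l[i] l[i + 1])
    (hj : j < l.length) (hne1 : j ≠ i) (hne2 : j ≠ i + 1) :
    ¬ (l.eraseIdx j).IsChain (StepR s) := by
  intro hc
  rw [List.isChain_iff_getElem] at hc
  have hlen : (l.eraseIdx j).length = l.length - 1 := by
    simp [List.length_eraseIdx, hj]
  rcases Nat.lt_or_ge j i with hji | hji
  · obtain ⟨k, rfl⟩ : ∃ k, i = k + 1 := ⟨i - 1, by omega⟩
    have := hc k (by omega)
    rw [List.getElem_eraseIdx, List.getElem_eraseIdx, dif_neg (by omega), dif_neg (by omega)] at this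
    exact hbad this
  · have hji2 : i + 2 ≤ j := by omega
    have := hc i (by omega)
    rw [List.getElem_eraseIdx, List.getElem_eraseIdx, dif_pos (by omega), dif_pos (by omega)] at this
    exact hbad this

theorem dirOkB_iff (report : List Int) (s : Int) :
    dirOkB report s = true ↔
      (report.IsChain (StepR s) ∨ ∃ j, j < report.length ∧ (report.eraseIdx j).IsChain (StepR s)) := by
  unfold dirOkB
  split <;> rename_i hfb
  · simp only [true_iff]
    left
    rw [← okB_iff_chain, ← firstBadB_none_iff]
    exact hfb
  · rename_i i
    obtain ⟨hlen, hbad'⟩ := firstBadB_some s report i hfb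
    have hbad := hbad' hlen
    have hnoc : ¬ report.IsChain (StepR s) := by
      rw [← okB_iff_chain, ← firstBadB_none_iff]
      simp [hfb]
    simp only [Bool.or_eq_true, okB_iff_chain, delB_eq_eraseIdx]
    constructor
    · rintro (h | h)
      · exact Or.inr ⟨i, by omega, h⟩
      · exact Or.inr ⟨i + 1, by omega, h⟩
    · rintro (h | ⟨j, hjlen, hch⟩)
      · exact absurd h hnoc
      · by_cases hji : j = i
        · subst hji; exact Or.inl hch
        · by_cases hji1 : j = i + 1
          · subst hji1; exact Or.inr hch
          · exact absurd hch (not_chain_del_of_bad s report i j hlen hbad hjlen hji hji1)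

theorem exists_lt_or_split {n : Nat} (P Q : Nat → Prop) :
    (∃ k, k < n ∧ (P k ∨ Q k)) ↔ ((∃ k, k < n ∧ P k) ∨ (∃ k, k < n ∧ Q k)) := by
  constructor
  · rintro ⟨k, hk, h | h⟩
    · exact Or.inl ⟨k, hk, h⟩
    · exact Or.inr ⟨k, hk, h⟩
  · rintro (⟨k, hk, h⟩ | ⟨k, hk, h⟩)
    · exact ⟨k, hk, Or.inl h⟩
    · exact ⟨k, hk, Or.inr h⟩

theorem loopA_range_iff (report : List Int) :
    loopA report (PySem.List.pyRange 0 (report.length : Int) 1) = true ↔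
      ∃ k, k < report.length ∧ isSafeA (report.eraseIdx k) = true := by
  rw [loopA_iff]
  constructor
  · rintro ⟨i, hmem, hs⟩
    rw [PySem.List.mem_pyRange_one] at hmem
    obtain ⟨h0, hn⟩ := hmem
    refine ⟨i.toNat, by omega, ?_⟩
    have : popDel report i = report.eraseIdx i.toNat := by
      unfold popDel
      rw [show i = (i.toNat : Int) by omega, PySem.List.pop?_natCast report i.toNat (by omega)]
      simp
      congr 1
      omega
    rwa [this] at hs
  · rintro ⟨k, hk, hs⟩
    refine ⟨(k : Int), ?_, ?_⟩
    · rw [PySem.List.mem_pyRange_one]; omega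
    · unfold popDel
      rw [PySem.List.pop?_natCast report k hk]
      exact hs


theorem a_eq_b (report : List Int) :
    is_safe_allow_single_error report = is_safe_allow_single_error_alt report := by
  have hA : is_safe_allow_single_error report = true ↔
      ((report.IsChain (StepR 1) ∨ report.IsChain (StepR (-1))) ∨
        ∃ k, k < report.length ∧
          ((report.eraseIdx k).IsChain (StepR 1) ∨ (report.eraseIdx k).IsChain (StepR (-1)))) := by
    unfold is_safe_allow_single_error
    split <;> rename_i h
    · simp only [true_iff]
      exact Or.inl ((isSafeA_iff report).mp h)
    · rw [loopA_range_iff]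
      constructor
      · rintro ⟨k, hk, hs⟩
        exact Or.inr ⟨k, hk, (isSafeA_iff _).mp hs⟩
      · rintro (hS | ⟨k, hk, hs⟩)
        · exact absurd ((isSafeA_iff report).mpr hS) (by simpa using h)
        · exact ⟨k, hk, (isSafeA_iff _).mpr hs⟩
  have hB : is_safe_allow_single_error_alt report = true ↔
      ((report.IsChain (StepR 1) ∨ report.IsChain (StepR (-1))) ∨
        ∃ k, k < report.length ∧
          ((report.eraseIdx k).IsChain (StepR 1) ∨ (report.eraseIdx k).IsChain (StepR (-1)))) := by
    unfold is_safe_allow_single_error_alt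
    simp only [Bool.or_eq_true, dirOkB_iff]
    rw [exists_lt_or_split]
    constructor
    · rintro ((h | h) | (h | h))
      · exact Or.inl (Or.inl h)
      · exact Or.inr (Or.inl h)
      · exact Or.inl (Or.inr h)
      · exact Or.inr (Or.inr h)
    · rintro ((h | h) | (h | h))
      · exact Or.inl (Or.inl h)
      · exact Or.inr (Or.inl h)
      · exact Or.inl (Or.inr h)
      · exact Or.inr (Or.inr h)
  have hiff := hA.trans hB.symm
  cases hx : is_safe_allow_single_error report <;>
    cases hy : is_safe_allow_single_error_alt report <;> simp_all


-- ===== VERDICT (by name: the statement is the Claim_ definition above) =====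
theorem is_safe_allow_single_error_spec : Claim_equal_is_safe_allow_single_error := by
  intro report _
  unfold Spec_is_safe_allow_single_error
  exact a_eq_b report
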